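-- pv_equiv track=rewrite | github.com/Hopalonger/CutSheetCreator | Main.py | GetNewPort
-- ===== SOURCE A (Python) =====
-- def GetNewPort(Sides): # New active devies
--     RightInterfaces = Sides[0]
--     LeftInterfaces = Sides[1]
--     i = 24 # Start out at interface 24, or the right side
--     d = 1 # start on the first device
--     for Interface in RightInterfaces:
--         i += 1 # iterate the list
--         Interface.append(str(d) +"/0/" + str(i)) # Add to the end of each interface
--         # the new port name, based off device, and the interface id
--         if i == 48: # if we reach port 48, then go to the next device
--             i = 24
--             d += 1
--     i = 0 # repeat same process as above, for the range of 1-24 or left side interfaces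
--     d = 1
--     for Interface in LeftInterfaces:
--         i += 1
--         Interface.append(str(d) +"/0/" + str(i))
--         if i == 24:
--             i = 0
--             d += 1
--
--
--     return [RightInterfaces,LeftInterfaces]
-- ===== SOURCE B (Python) =====
-- def GetNewPort(Sides):
--     RightInterfaces = Sides[0]
--     LeftInterfaces = Sides[1]
--     for side, base in ((RightInterfaces, 25), (LeftInterfaces, 1)):
--         device = 1
--         rest = side
--         while rest:
--             for port, iface in enumerate(rest[:24], base):
--                 iface.append(str(device) + "/0/" + str(port))
--             rest = rest[24:]
--             device += 1
--     return [RightInterfaces, LeftInterfaces]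
-- ===== Notes on version B (the rewrite author's own statement) =====
-- stated objective: alternative
-- what changed: Replaces A's single stateful pass per side (running port counter with threshold-and-reset plus device counter) by a two-level chunked traversal: an outer loop slices the side into 24-interface device blocks and an inner enumerate labels each block with ports counted from the side's fixed base, so no reset logic or cross-iteration counter state exists.
import Mathlib
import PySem

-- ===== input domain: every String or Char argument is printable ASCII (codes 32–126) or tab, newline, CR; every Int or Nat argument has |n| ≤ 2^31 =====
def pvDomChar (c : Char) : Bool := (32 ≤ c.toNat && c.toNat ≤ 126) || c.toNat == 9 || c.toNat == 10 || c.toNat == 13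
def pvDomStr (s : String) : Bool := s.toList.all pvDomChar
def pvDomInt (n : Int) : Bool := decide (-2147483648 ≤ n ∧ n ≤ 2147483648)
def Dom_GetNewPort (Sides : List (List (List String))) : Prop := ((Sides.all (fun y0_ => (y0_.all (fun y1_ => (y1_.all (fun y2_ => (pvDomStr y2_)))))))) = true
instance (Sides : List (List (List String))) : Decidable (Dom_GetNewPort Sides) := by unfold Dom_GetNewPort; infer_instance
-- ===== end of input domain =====

-- B replaces A's stateful per-side pass (running port counter with threshold reset) by a
-- chunked traversal: 24-interface device blocks labelled by an inner enumerate. Equivalence is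
-- about the RETURN value; in Python both A and B append to the same inner list objects in place.


-- ===== PORT A =====
-- A's right-side loop: running interface counter i (reset to 24 at 48) and device counter d.
def loopRight : List (List String) → Int → Int → List (List String)
  | [], _, _ => []
  | Interface :: rest, i, d =>
    let i' := i + 1
    let Interface' := Interface ++ [PySem.Int.toStr d ++ "/0/" ++ PySem.Int.toStr i']
    if i' = 48 then Interface' :: loopRight rest 24 (d + 1)
    else Interface' :: loopRight rest i' d

-- A's left-side loop: counter i reset to 0 at 24.
def loopLeft : List (List String) → Int → Int → List (List String)
  | [], _, _ => []
  | Interface :: rest, i, d =>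
    let i' := i + 1
    let Interface' := Interface ++ [PySem.Int.toStr d ++ "/0/" ++ PySem.Int.toStr i']
    if i' = 24 then Interface' :: loopLeft rest 0 (d + 1)
    else Interface' :: loopLeft rest i' d

def GetNewPort (Sides : List (List (List String))) : List (List (List String)) :=
  match Sides with
  | RightInterfaces :: LeftInterfaces :: _ =>
      [loopRight RightInterfaces 24 1, loopLeft LeftInterfaces 0 1]
  | _ => []  -- Sides[0] / Sides[1] raise IndexError in Python: excluded by Pre_GetNewPort

-- ===== PORT B =====
-- B's inner 'for port, iface in enumerate(chunk, base)' loop: labels one device block.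
def enumAppend : List (List String) → Int → Int → List (List String)
  | [], _, _ => []
  | iface :: rest, d, p =>
    (iface ++ [PySem.Int.toStr d ++ "/0/" ++ PySem.Int.toStr p]) :: enumAppend rest d (p + 1)

-- B's outer 'while rest:' loop: label a 24-interface chunk, recurse on the remainder.
def labelSide : List (List String) → Int → Int → List (List String)
  | [], _, _ => []
  | iface :: rest, base, d =>
      enumAppend ((iface :: rest).take 24) d base ++
        labelSide ((iface :: rest).drop 24) base (d + 1)
termination_by side => side.length
decreasing_by simp

def GetNewPort_alt (Sides : List (List (List String))) : List (List (List String)) :=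
  -- same IndexError region as A (fewer than two sides), excluded by Pre_GetNewPort
  match Sides with
  | [] => []
  | [_] => []
  | RightInterfaces :: LeftInterfaces :: _ =>
      [labelSide RightInterfaces 25 1, labelSide LeftInterfaces 1 1]

-- ===== PRECONDITION & SPEC =====
-- Pre_ excludes exactly the inputs where Python A raises IndexError (fewer than two sides).
def Pre_GetNewPort (Sides : List (List (List String))) : Prop := 2 ≤ Sides.length
instance (Sides : List (List (List String))) : Decidable (Pre_GetNewPort Sides) := by
  unfold Pre_GetNewPort; infer_instance

def pvWitness_GetNewPort : List (List (List String)) := [[["a"], []], [["b"]]]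

def Spec_GetNewPort (Sides : List (List (List String))) (out : List (List (List String))) : Prop := out = GetNewPort_alt Sides
instance (Sides : List (List (List String))) (out : List (List (List String))) : Decidable (Spec_GetNewPort Sides out) := by unfold Spec_GetNewPort; infer_instance

-- ===== CLAIM (what is proved, stated in full; the proofs are below) =====
def Claim_equal_GetNewPort : Prop := ∀ (Sides : List (List (List String))), Dom_GetNewPort Sides → Pre_GetNewPort Sides → Spec_GetNewPort Sides (GetNewPort Sides)

-- ===== LEMMAS AND PROOFS =====

-- A's right loop with counter 24+k (k < 24) labels the next 24-k interfaces with ports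
-- 24+k+1, … and then continues with counter 24 and the next device.
lemma loopRight_partial (xs : List (List String)) :
    ∀ (k : Nat) (d : Int), k < 24 →
      loopRight xs (24 + (k : Int)) d
        = enumAppend (xs.take (24 - k)) d (24 + (k : Int) + 1)
            ++ loopRight (xs.drop (24 - k)) 24 (d + 1) := by
  induction xs with
  | nil => intro k d _; simp [loopRight, enumAppend]
  | cons x rest ih =>
    intro k d hk
    simp only [loopRight]
    by_cases h : k = 23
    · subst h
      have h48 : (24 : Int) + (23 : Nat) + 1 = 48 := by norm_num
      rw [if_pos h48]
      simp [enumAppend]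
    · have hk' : k < 23 := by omega
      have h48 : ¬ ((24 : Int) + (k : Nat) + 1 = 48) := by
        intro hc
        have : (k : Int) = 23 := by omega
        exact h (by exact_mod_cast this)
      rw [if_neg h48]
      have htake : (x :: rest).take (24 - k) = x :: rest.take (24 - (k + 1)) := by
        have : 24 - k = (24 - (k + 1)) + 1 := by omega
        rw [this, List.take_succ_cons]
      have hdrop : (x :: rest).drop (24 - k) = rest.drop (24 - (k + 1)) := by
        have : 24 - k = (24 - (k + 1)) + 1 := by omega
        rw [this, List.drop_succ_cons]
      rw [htake, hdrop]
      simp only [enumAppend, List.cons_append]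
      have hcast : (24 : Int) + (k : Nat) + 1 = 24 + ((k + 1 : Nat) : Int) := by push_cast; ring
      rw [hcast, ih (k + 1) d (by omega)]

-- A's left loop with counter k (k < 24) labels the next 24-k interfaces with ports k+1, …
lemma loopLeft_partial (xs : List (List String)) :
    ∀ (k : Nat) (d : Int), k < 24 →
      loopLeft xs (k : Int) d
        = enumAppend (xs.take (24 - k)) d ((k : Int) + 1)
            ++ loopLeft (xs.drop (24 - k)) 0 (d + 1) := by
  induction xs with
  | nil => intro k d _; simp [loopLeft, enumAppend]
  | cons x rest ih =>
    intro k d hk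
    simp only [loopLeft]
    by_cases h : k = 23
    · subst h
      have h24 : ((23 : Nat) : Int) + 1 = 24 := by norm_num
      rw [if_pos h24]
      simp [enumAppend]
    · have h24 : ¬ (((k : Nat) : Int) + 1 = 24) := by
        intro hc
        have : (k : Int) = 23 := by omega
        exact h (by exact_mod_cast this)
      rw [if_neg h24]
      have htake : (x :: rest).take (24 - k) = x :: rest.take (24 - (k + 1)) := by
        have : 24 - k = (24 - (k + 1)) + 1 := by omega
        rw [this, List.take_succ_cons]
      have hdrop : (x :: rest).drop (24 - k) = rest.drop (24 - (k + 1)) := by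
        have : 24 - k = (24 - (k + 1)) + 1 := by omega
        rw [this, List.drop_succ_cons]
      rw [htake, hdrop]
      simp only [enumAppend, List.cons_append]
      have hcast : ((k : Nat) : Int) + 1 = ((k + 1 : Nat) : Int) := by push_cast; ring
      rw [hcast, ih (k + 1) d (by omega)]

-- Chunk decomposition: A's right loop started at counter 24 equals B's labelling with base 25.
lemma loopRight_label : ∀ (n : Nat) (xs : List (List String)) (d : Int), xs.length ≤ n →
    loopRight xs 24 d = labelSide xs 25 d := by
  intro n
  induction n with
  | zero =>
    intro xs d h
    have : xs = [] := List.length_eq_zero_iff.mp (Nat.le_zero.mp h)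
    subst this; simp [loopRight, labelSide]
  | succ n ih =>
    intro xs d h
    match xs with
    | [] => simp [loopRight, labelSide]
    | x :: rest =>
      have h0 := loopRight_partial (x :: rest) 0 d (by norm_num)
      simp only [Nat.cast_zero, Nat.sub_zero, add_zero] at h0
      have h25 : (24 : Int) + 1 = 25 := by norm_num
      rw [h25] at h0
      rw [h0, labelSide]
      rw [ih _ (d + 1) (by simp at h ⊢; omega)]

lemma loopLeft_label : ∀ (n : Nat) (xs : List (List String)) (d : Int), xs.length ≤ n →
    loopLeft xs 0 d = labelSide xs 1 d := by
  intro n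
  induction n with
  | zero =>
    intro xs d h
    have : xs = [] := List.length_eq_zero_iff.mp (Nat.le_zero.mp h)
    subst this; simp [loopLeft, labelSide]
  | succ n ih =>
    intro xs d h
    match xs with
    | [] => simp [loopLeft, labelSide]
    | x :: rest =>
      have h0 := loopLeft_partial (x :: rest) 0 d (by norm_num)
      simp only [Nat.cast_zero, Nat.sub_zero, zero_add] at h0
      rw [h0, labelSide]
      rw [ih _ (d + 1) (by simp at h ⊢; omega)]

-- ===== VERDICT (by name: the statement is the Claim_ definition above) =====
theorem GetNewPort_spec : Claim_equal_GetNewPort := by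
  intro Sides _ hpre
  unfold Spec_GetNewPort
  match Sides with
  | [] => simp [Pre_GetNewPort] at hpre
  | [_] => simp [Pre_GetNewPort] at hpre
  | r :: l :: rest =>
    simp only [GetNewPort, GetNewPort_alt]
    rw [loopRight_label r.length r 1 le_rfl, loopLeft_label l.length l 1 le_rfl]
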